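-- pv_equiv track=rewrite | github.com/henkmuller/sw_avb_dc | tests/auto_test/state_rendering.py | connection_line
-- ===== SOURCE A (Python) =====
-- def connection_line(ep_names, ep_num, active_talkers):
--   line = ""
--   connect = "-"
--   for i,name in enumerate(ep_names):
--     if i == ep_num:
--       line += "-+"
--       connect = " "
--     elif name in active_talkers:
--       line += "%s|" % connect
--     else:
--       line += connect * 2
--   return line
-- ===== SOURCE B (Python) =====
-- def connection_line(ep_names, ep_num, active_talkers):
--     if 0 <= ep_num < len(ep_names):
--         pre = "".join("-|" if n in active_talkers else "--" for n in ep_names[:ep_num])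
--         suf = "".join(" |" if n in active_talkers else "  " for n in ep_names[ep_num + 1:])
--         return pre + "-+" + suf
--     return "".join("-|" if n in active_talkers else "--" for n in ep_names)
-- ===== Notes on version B (the rewrite author's own statement) =====
-- stated objective: simpler
-- what changed: Replaces the single stateful pass that mutates a 'connect' separator with an index-validity test and three slice-scoped comprehensions (prefix with '-', the '-+' marker, suffix with ' '), joined.
import Mathlib
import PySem

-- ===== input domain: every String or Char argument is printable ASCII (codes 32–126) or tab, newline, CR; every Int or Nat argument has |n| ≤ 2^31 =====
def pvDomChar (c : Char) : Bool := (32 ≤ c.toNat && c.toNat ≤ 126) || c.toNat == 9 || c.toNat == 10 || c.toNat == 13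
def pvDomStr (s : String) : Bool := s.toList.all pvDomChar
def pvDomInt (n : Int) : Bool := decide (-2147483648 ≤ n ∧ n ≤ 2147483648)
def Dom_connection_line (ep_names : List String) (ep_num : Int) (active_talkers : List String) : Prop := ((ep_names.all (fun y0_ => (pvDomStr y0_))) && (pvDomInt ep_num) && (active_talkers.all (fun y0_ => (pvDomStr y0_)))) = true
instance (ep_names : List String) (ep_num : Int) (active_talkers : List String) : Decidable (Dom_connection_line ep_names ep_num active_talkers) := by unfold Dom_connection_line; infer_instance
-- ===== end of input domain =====

-- B replaces A's single stateful pass (mutating the `connect` separator) by an index-validity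
-- test and three slice-scoped pieces (prefix / "-+" marker / suffix) that are concatenated;
-- objective: simpler decomposition, same cost.

-- ===== PORT A =====
def connection_line (ep_names : List String) (ep_num : Int) (active_talkers : List String) : String :=
  ((PySem.List.enumerate ep_names 0).foldl
    (fun (st : String × String) (p : Int × String) =>
      if p.1 = ep_num then (st.1 ++ "-+", " ")
      else if active_talkers.contains p.2 then (st.1 ++ (st.2 ++ "|"), st.2)
      else (st.1 ++ (st.2 ++ st.2), st.2))
    ("", "-")).1

-- ===== PORT B =====
def connection_line_alt (ep_names : List String) (ep_num : Int) (active_talkers : List String) : String :=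
  if 0 ≤ ep_num ∧ ep_num < (ep_names.length : Int) then
    PySem.Str.join "" ((PySem.List.slice ep_names none (some ep_num)).map
        (fun n => if active_talkers.contains n then "-|" else "--"))
      ++ "-+"
      ++ PySem.Str.join "" ((PySem.List.slice ep_names (some (ep_num + 1)) none).map
        (fun n => if active_talkers.contains n then " |" else "  "))
  else
    PySem.Str.join "" (ep_names.map (fun n => if active_talkers.contains n then "-|" else "--"))

-- ===== PRECONDITION & SPEC =====
def Spec_connection_line (ep_names : List String) (ep_num : Int) (active_talkers : List String) (out : String) : Prop := out = connection_line_alt ep_names ep_num active_talkers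
instance (ep_names : List String) (ep_num : Int) (active_talkers : List String) (out : String) : Decidable (Spec_connection_line ep_names ep_num active_talkers out) := by unfold Spec_connection_line; infer_instance

-- ===== CLAIM (what is proved, stated in full; the proofs are below) =====
def Claim_equal_connection_line : Prop := ∀ (ep_names : List String) (ep_num : Int) (active_talkers : List String), Dom_connection_line ep_names ep_num active_talkers → Spec_connection_line ep_names ep_num active_talkers (connection_line ep_names ep_num active_talkers)

-- ===== LEMMAS AND PROOFS =====

theorem join_empty_cons (x : String) (l : List String) :
    PySem.Str.join "" (x :: l) = x ++ PySem.Str.join "" l := by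
  cases l with
  | nil => simp [PySem.Str.join, PySem.Chars.join_singleton, PySem.Chars.join_nil]
  | cons y t => simp [PySem.Str.join, PySem.Chars.join_cons_cons]

theorem join_empty_nil : PySem.Str.join "" ([] : List String) = "" := by
  simp [PySem.Str.join, PySem.Chars.join_nil]

-- The loop of A never meets index ep_num: it keeps `connect` and renders every name with it.
theorem cl_foldl_nohit (ats : List String) (e : Int) (xs : List String) (s : Int)
    (line c : String) (h : e < s ∨ s + (xs.length : Int) ≤ e) :
    (PySem.List.enumerate xs s).foldl
      (fun (st : String × String) (p : Int × String) =>
        if p.1 = e then (st.1 ++ "-+", " ")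
        else if ats.contains p.2 then (st.1 ++ (st.2 ++ "|"), st.2)
        else (st.1 ++ (st.2 ++ st.2), st.2)) (line, c)
    = (line ++ PySem.Str.join "" (xs.map (fun n => if ats.contains n then c ++ "|" else c ++ c)), c) := by
  induction xs generalizing s line with
  | nil => simp [PySem.List.enumerate_nil, join_empty_nil]
  | cons x t ih =>
    have hne : s ≠ e := by
      rcases h with h | h
      · omega
      · simp only [List.length_cons] at h; push_cast at h; omega
    have h' : e < s + 1 ∨ (s + 1) + (t.length : Int) ≤ e := by
      rcases h with h | h
      · left; omega
      · right; simp only [List.length_cons] at h; push_cast at h; omega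
    rw [PySem.List.enumerate_cons]
    simp only [List.foldl_cons, if_neg hne]
    by_cases hm : ats.contains x = true
    · simp only [hm, if_pos]
      rw [ih (s + 1) (line ++ (c ++ "|")) h', List.map_cons, join_empty_cons]
      have hm' : x ∈ ats := by simpa using hm
      simp [hm', String.append_assoc]
    · simp only [hm, if_neg, Bool.false_eq_true, not_false_eq_true]
      rw [ih (s + 1) (line ++ (c ++ c)) h', List.map_cons, join_empty_cons]
      have hm' : x ∉ ats := by simpa using hm
      simp [hm', String.append_assoc]

-- The loop hits index ep_num inside xs: prefix with '-', marker, suffix with ' '.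
theorem cl_foldl_hit (ats : List String) (e : Int) (xs : List String) (s : Int)
    (line : String) (h1 : s ≤ e) (h2 : e < s + (xs.length : Int)) :
    (PySem.List.enumerate xs s).foldl
      (fun (st : String × String) (p : Int × String) =>
        if p.1 = e then (st.1 ++ "-+", " ")
        else if ats.contains p.2 then (st.1 ++ (st.2 ++ "|"), st.2)
        else (st.1 ++ (st.2 ++ st.2), st.2)) (line, "-")
    = (line
        ++ PySem.Str.join "" ((xs.take (e - s).toNat).map
             (fun n => if ats.contains n then "-|" else "--"))
        ++ "-+"
        ++ PySem.Str.join "" ((xs.drop ((e - s).toNat + 1)).map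
             (fun n => if ats.contains n then " |" else "  ")), " ") := by
  induction xs generalizing s line with
  | nil => exfalso; simp only [List.length_nil] at h2; omega
  | cons x t ih =>
    rw [PySem.List.enumerate_cons]
    simp only [List.foldl_cons]
    by_cases he : s = e
    · subst he
      rw [if_pos rfl]
      rw [cl_foldl_nohit ats s t (s + 1) (line ++ "-+") " " (Or.inl (by omega))]
      have hz : (s - s).toNat = 0 := by omega
      have hf : (fun n => if ats.contains n then (" " : String) ++ "|" else (" " : String) ++ " ")
          = (fun n => if ats.contains n then " |" else "  ") := by
        funext n; split <;> rfl
      rw [hf]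
      simp only [hz, List.take_zero, List.map_nil, join_empty_nil, List.drop_succ_cons,
        List.drop_zero, String.append_empty, String.append_assoc]
    · have hs : s < e := lt_of_le_of_ne h1 he
      have h2' : e < (s + 1) + (t.length : Int) := by
        simp only [List.length_cons] at h2; push_cast at h2; omega
      have hk : (e - s).toNat = (e - (s + 1)).toNat + 1 := by omega
      simp only [if_neg he]
      by_cases hm : ats.contains x = true
      · simp only [hm, if_pos]
        rw [ih (s + 1) (line ++ ("-" ++ "|")) (by omega) h2', hk]
        simp only [List.take_succ_cons, List.map_cons, join_empty_cons, List.drop_succ_cons]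
        have : ((if ats.contains x then ("-|" : String) else "--")) = "-|" := by rw [if_pos hm]
        rw [this]
        simp only [String.append_assoc]
        rfl
      · simp only [hm, if_neg, Bool.false_eq_true, not_false_eq_true]
        rw [ih (s + 1) (line ++ ("-" ++ "-")) (by omega) h2', hk]
        simp only [List.take_succ_cons, List.map_cons, join_empty_cons, List.drop_succ_cons]
        have : ((if ats.contains x then ("-|" : String) else "--")) = "--" := by
          rw [if_neg (by simpa using hm)]
        rw [this]
        simp only [String.append_assoc]
        rfl

-- ===== VERDICT (by name: the statement is the Claim_ definition above) =====
theorem connection_line_spec : Claim_equal_connection_line := by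
  intro eps e ats _
  unfold Spec_connection_line connection_line connection_line_alt
  by_cases hv : 0 ≤ e ∧ e < (eps.length : Int)
  · rw [if_pos hv]
    rw [cl_foldl_hit ats e eps 0 "" (by omega) (by omega)]
    have h1 : PySem.List.slice eps none (some e) = eps.take e.toNat :=
      PySem.List.slice_to eps hv.1
    have h2 : PySem.List.slice eps (some (e + 1)) none = eps.drop (e + 1).toNat :=
      PySem.List.slice_from eps (by omega)
    have h3 : (e + 1).toNat = e.toNat + 1 := by omega
    have h4 : (e - 0).toNat = e.toNat := by omega
    rw [h1, h2, h3, h4]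
    simp [String.empty_append, String.append_assoc]
  · rw [if_neg hv]
    have h : e < 0 ∨ (0 : Int) + (eps.length : Int) ≤ e := by
      rcases not_and_or.mp hv with h | h
      · left; omega
      · right; omega
    rw [cl_foldl_nohit ats e eps 0 "" "-" h]
    have hf : (fun n => if ats.contains n then ("-" : String) ++ "|" else ("-" : String) ++ "-")
        = (fun n => if ats.contains n then "-|" else "--") := by
      funext n; split <;> rfl
    rw [hf, String.empty_append]
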